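-- pv_equiv track=rewrite | github.com/cassieangel/phazed-bot-tournament | phasetype.py | same_colour_no_ace
-- ===== SOURCE A (Python) =====
-- def same_colour_no_ace(group):
--     '''
--     check if the cards in the group has the same colour (ACE is not wild card)
--     '''
--     if len(group) > 1:
--         # change each card's suit into colour
--         group_by_colour = []
--         for card in group:
--             value = card[0]
--             suit = card[1]
--             if suit == "S" or suit == "C":
--                 suit = "BLACK"
--             if suit == "H" or suit == "D":
--                 suit = "RED"
--             group_by_colour += [(value, suit), ]
--         # find first colour (first card)
--         for card in group_by_colour:
--             value = card[0]
--             colour = card[1]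
--             firstcolour = colour
--             break
--         # checking if group is the same colour
--         samecolour = True
--         for card in group_by_colour:
--             value = card[0]
--             colour = card[1]
--             if colour != firstcolour:
--                 samecolour = False
--         return samecolour
-- ===== SOURCE B (Python) =====
-- def same_colour_no_ace(group):
--     '''
--     check if the cards in the group has the same colour (ACE is not wild card)
--     '''
--     if len(group) > 1:
--         # two suits have the same colour iff they are equal, both black (S/C)
--         # or both red (H/D); this relation is an equivalence, so the whole
--         # group is monochrome iff every adjacent pair is same-coloured.
--         def same(s, t):
--             return s == t or (s in "SC" and t in "SC") or (s in "HD" and t in "HD")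
--         return all(same(a[1], b[1]) for a, b in zip(group, group[1:]))
-- ===== Notes on version B (the rewrite author's own statement) =====
-- stated objective: alternative
-- what changed: Instead of normalising every suit to a colour and comparing all colours to the first, B uses a symmetric same-colour relation on raw suit pairs (equal, both in SC, or both in HD) and checks only adjacent pairs with zip, relying on the relation being an equivalence; no colour mapping or intermediate pair list is built.
import Mathlib
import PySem

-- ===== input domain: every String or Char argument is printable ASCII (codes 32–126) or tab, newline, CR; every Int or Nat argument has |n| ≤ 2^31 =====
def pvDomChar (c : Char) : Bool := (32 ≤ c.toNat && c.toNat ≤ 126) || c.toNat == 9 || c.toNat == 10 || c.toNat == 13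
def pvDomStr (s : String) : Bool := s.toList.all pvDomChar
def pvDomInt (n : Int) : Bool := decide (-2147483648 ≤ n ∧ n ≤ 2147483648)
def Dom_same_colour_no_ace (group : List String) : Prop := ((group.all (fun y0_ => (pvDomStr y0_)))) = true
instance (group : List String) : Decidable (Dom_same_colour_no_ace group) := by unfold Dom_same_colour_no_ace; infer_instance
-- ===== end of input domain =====

-- B drops A's colour-normalisation pass entirely: it checks a symmetric same-colour
-- relation on raw suit characters over adjacent pairs only (zip), valid because the
-- relation is an equivalence (alternative decomposition; same cost).

-- ===== PORT A =====
-- card[1] as a 1-character string (List Char); total form, only used under Pre_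
def pvSuitOf (card : String) : List Char :=
  ((PySem.Str.pyGet? card 1).map (fun c => [c])).getD []

def pvValueOf (card : String) : List Char :=
  ((PySem.Str.pyGet? card 0).map (fun c => [c])).getD []

-- the two sequential 'if' statements of A's first loop
def pvColourizeA (suit : List Char) : List Char :=
  let suit := if suit = ['S'] ∨ suit = ['C'] then "BLACK".toList else suit
  let suit := if suit = ['H'] ∨ suit = ['D'] then "RED".toList else suit
  suit

def same_colour_no_ace (group : List String) : Option Bool :=
  if 1 < group.length then
    -- first loop: build group_by_colour
    let gbc : List (List Char × List Char) :=
      group.foldl (fun acc card => acc ++ [(pvValueOf card, pvColourizeA (pvSuitOf card))]) []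
    -- second loop with break: firstcolour = colour of first card
    let firstcolour := ((gbc.head?).map Prod.snd).getD []
    -- third loop: comparison flag
    some (gbc.foldl (fun sc card => if card.2 ≠ firstcolour then false else sc) true)
  else
    none

-- ===== PORT B =====
-- card[1] as a Char; total form, only used under Pre_
def pvSuitC (card : String) : Char := (PySem.Str.pyGet? card 1).getD ' '

-- 's == t or (s in "SC" and t in "SC") or (s in "HD" and t in "HD")'
def pvSameColour (s t : Char) : Bool :=
  s == t || ((s == 'S' || s == 'C') && (t == 'S' || t == 'C'))
         || ((s == 'H' || s == 'D') && (t == 'H' || t == 'D'))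

def same_colour_no_ace_alt (group : List String) : Option Bool :=
  if 1 < group.length then
    some ((group.zip (group.drop 1)).all (fun p => pvSameColour (pvSuitC p.1) (pvSuitC p.2)))
  else
    none

-- ===== PRECONDITION & SPEC =====
-- Pre_ excludes groups of more than one card containing a card shorter than 2
-- characters: there A (and B) raise IndexError on card[1].
def Pre_same_colour_no_ace (group : List String) : Prop :=
  1 < group.length → ∀ card ∈ group, 2 ≤ card.toList.length

instance (group : List String) : Decidable (Pre_same_colour_no_ace group) := by
  unfold Pre_same_colour_no_ace; infer_instance

def pvWitness_same_colour_no_ace : List String := ["5S", "7C", "9H"]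

def Spec_same_colour_no_ace (group : List String) (out : Option Bool) : Prop := out = same_colour_no_ace_alt group
instance (group : List String) (out : Option Bool) : Decidable (Spec_same_colour_no_ace group out) := by unfold Spec_same_colour_no_ace; infer_instance

-- ===== CLAIM =====
def Claim_equal_same_colour_no_ace : Prop := ∀ (group : List String), Dom_same_colour_no_ace group → Pre_same_colour_no_ace group → Spec_same_colour_no_ace group (same_colour_no_ace group)

-- ===== LEMMAS AND PROOFS =====

-- under Pre_, the suit list of A is the singleton of B's suit char
theorem pvSuitOf_eq (card : String) (h : 2 ≤ card.toList.length) :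
    pvSuitOf card = [pvSuitC card] := by
  unfold pvSuitOf pvSuitC
  have h1 : (1:Nat) < card.toList.length := by omega
  have e : (1:Int) = ((1:Nat):Int) := rfl
  rw [PySem.Str.pyGet?, PySem.Chars.pyGet?, e, PySem.List.pyGet?_natCast]
  simp [List.getElem?_eq_getElem h1]

-- A's two sequential ifs on a singleton suit, as one if/elif chain
theorem pvColourizeA_singleton (s : Char) :
    pvColourizeA [s] = if s = 'S' ∨ s = 'C' then "BLACK".toList
      else if s = 'H' ∨ s = 'D' then "RED".toList else [s] := by
  unfold pvColourizeA
  split_ifs with h1 h2 h2 <;> simp_all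

-- B's symmetric relation on suit chars = equality of A's colours
theorem pvSameColour_eq (s t : Char) :
    pvSameColour s t = decide (pvColourizeA [s] = pvColourizeA [t]) := by
  unfold pvSameColour
  rw [pvColourizeA_singleton, pvColourizeA_singleton]
  split_ifs with h1 h2 h3 h3 h4 h2 h3 h3 <;>
    rw [Bool.eq_iff_iff] <;>
    simp only [Bool.or_eq_true, Bool.and_eq_true, beq_iff_eq, decide_eq_true_eq] <;>
    first
      | (rcases h1 with rfl | rfl <;> rcases h2 with rfl | rfl <;> decide)
      | (rcases h1 with rfl | rfl <;> rcases h3 with rfl | rfl <;> decide)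
      | (rcases h2 with rfl | rfl <;> rcases h3 with rfl | rfl <;> decide)
      | (rcases h3 with rfl | rfl <;> rcases h4 with rfl | rfl <;> decide)
      | (rcases h1 with rfl | rfl <;> simp_all [@eq_comm Char])
      | (rcases h3 with rfl | rfl <;> simp_all [@eq_comm Char])
      | simp_all

-- all is invariant under pointwise-equal predicates (on members)
theorem pvAllCongr {α : Type} (l : List α) (p q : α → Bool)
    (h : ∀ x ∈ l, p x = q x) : l.all p = l.all q := by
  induction l with
  | nil => rfl
  | cons a t ih => simp_all

-- adjacent-pairs check of f-equality = all-equal-to-head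
theorem pvZipChain {α β : Type} [DecidableEq β] (f : α → β) (a : α) (t : List α) :
    ((a :: t).zip t).all (fun p => decide (f p.1 = f p.2))
      = t.all (fun y => decide (f y = f a)) := by
  induction t generalizing a with
  | nil => rfl
  | cons b t ih =>
    simp only [List.zip_cons_cons, List.all_cons, ih, decide_eq_true_eq]
    by_cases h : f a = f b
    · rw [h]
    · simp [h]
      exact fun hh => absurd hh.symm h

-- A's accumulator-append loop builds the map
theorem pvGbc_eq_map (group : List String) (init : List (List Char × List Char)) :
    group.foldl (fun acc card => acc ++ [(pvValueOf card, pvColourizeA (pvSuitOf card))]) init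
      = init ++ group.map (fun card => (pvValueOf card, pvColourizeA (pvSuitOf card))) := by
  induction group generalizing init with
  | nil => simp
  | cons a t ih => simp [List.foldl_cons, ih]

-- the comparison-flag loop is an 'all' over the pair list
theorem pvFlag (h : List Char) (l : List (List Char × List Char)) (b : Bool) :
    l.foldl (fun sc card => if card.2 ≠ h then false else sc) b
      = (b && l.all (fun p => p.2 = h)) := by
  induction l generalizing b with
  | nil => simp
  | cons a t ih =>
    rw [List.foldl_cons, ih]
    by_cases hx : a.2 = h <;> simp [List.all_cons, hx]

-- ===== VERDICT =====
theorem same_colour_no_ace_spec : Claim_equal_same_colour_no_ace := by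
  intro group _ hpre
  unfold Spec_same_colour_no_ace same_colour_no_ace same_colour_no_ace_alt
  by_cases h1 : 1 < group.length
  · simp only [h1, if_true]
    have hlen := hpre h1
    cases group with
    | nil => simp at h1
    | cons a t =>
      rw [pvGbc_eq_map]
      simp only [pvFlag]
      simp only [List.nil_append, Option.some_inj, List.map_cons, List.head?_cons,
        Option.map_some, Option.getD_some]
      simp only [List.all_cons, List.all_map, Bool.true_and, decide_true]
      rw [List.drop_one, List.tail_cons]
      have hc : ∀ p ∈ (a :: t).zip t, pvSameColour (pvSuitC p.1) (pvSuitC p.2)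
          = decide (pvColourizeA (pvSuitOf p.1) = pvColourizeA (pvSuitOf p.2)) := by
        intro p hp
        have h1' : p.1 ∈ a :: t := List.of_mem_zip hp |>.1
        have h2' : p.2 ∈ a :: t := List.mem_cons_of_mem a (List.of_mem_zip hp |>.2)
        rw [pvSuitOf_eq _ (hlen _ h1'), pvSuitOf_eq _ (hlen _ h2'), pvSameColour_eq]
      rw [pvAllCongr _ _ _ hc,
        pvZipChain (fun card => pvColourizeA (pvSuitOf card)) a t]
      rfl
  · simp only [h1, if_false]
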